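-- pv_equiv track=rewrite | github.com/bingran-li/MDP_Algorithms_Benchmark | code/show_winning_combinations.py | generate_winning_combinations
-- ===== SOURCE A (Python) =====
-- def generate_winning_combinations(board_size):
--     """Generate all possible winning combinations for a k×k board"""
--     k = board_size
--     combinations = []
--
--     # Rows
--     for row in range(k):
--         combinations.append([row * k + col for col in range(k)])
--
--     # Columns
--     for col in range(k):
--         combinations.append([row * k + col for row in range(k)])
--
--     # Main diagonal
--     combinations.append([i * k + i for i in range(k)])
--
--     # Other diagonal
--     combinations.append([i * k + (k - 1 - i) for i in range(k)])
--
--     return combinations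
-- ===== SOURCE B (Python) =====
-- def generate_winning_combinations(board_size):
--     """Generate all possible winning combinations for a k×k board"""
--     k = board_size
--     # single sweep over all cells, classifying each cell into its buckets
--     rows = [[] for _ in range(k)]
--     cols = [[] for _ in range(k)]
--     diag = []
--     anti = []
--     for r in range(k):
--         for c in range(k):
--             cell = r * k + c
--             rows[r].append(cell)
--             cols[c].append(cell)
--             if r == c:
--                 diag.append(cell)
--             if r + c == k - 1:
--                 anti.append(cell)
--     return rows + cols + [diag, anti]
-- ===== Notes on version B (the rewrite author's own statement) =====
-- stated objective: alternative
-- what changed: A generates each winning line with its own index-formula comprehension in four staged passes; B makes one sweep over the board cells and classifies each cell into per-row/per-column bucket accumulators plus the two diagonal accumulators, assembling the answer from the buckets at the end.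
import Mathlib
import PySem

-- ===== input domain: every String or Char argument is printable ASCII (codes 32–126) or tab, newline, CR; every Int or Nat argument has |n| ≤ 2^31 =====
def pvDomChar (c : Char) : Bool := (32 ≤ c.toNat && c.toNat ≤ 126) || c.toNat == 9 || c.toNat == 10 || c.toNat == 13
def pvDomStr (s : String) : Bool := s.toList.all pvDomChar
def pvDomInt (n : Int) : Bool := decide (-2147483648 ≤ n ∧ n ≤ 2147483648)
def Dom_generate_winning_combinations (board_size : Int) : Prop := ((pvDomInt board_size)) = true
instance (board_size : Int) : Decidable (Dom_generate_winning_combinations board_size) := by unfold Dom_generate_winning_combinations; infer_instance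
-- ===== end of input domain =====

-- B replaces A's four staged index-formula passes by one sweep over the cells that
-- classifies each cell into per-row/per-column/diagonal bucket accumulators; alternative, same cost.


-- ===== PORT A =====
def generate_winning_combinations (board_size : Int) : List (List Int) :=
  let k := board_size
  -- Rows
  let combinations := (PySem.List.pyRange 0 k 1).foldl
    (fun acc row => acc ++ [(PySem.List.pyRange 0 k 1).map (fun col => row * k + col)]) []
  -- Columns
  let combinations := (PySem.List.pyRange 0 k 1).foldl
    (fun acc col => acc ++ [(PySem.List.pyRange 0 k 1).map (fun row => row * k + col)]) combinations
  -- Main diagonal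
  let combinations := combinations ++ [(PySem.List.pyRange 0 k 1).map (fun i => i * k + i)]
  -- Other diagonal
  combinations ++ [(PySem.List.pyRange 0 k 1).map (fun i => i * k + (k - 1 - i))]

-- ===== PORT B =====
-- inner-loop body of Source B: classify one cell into its row/column buckets and the diagonals.
-- rows[r].append / cols[c].append is List.modify at r.toNat / c.toNat: exact because the loop
-- variables r, c come from range(k), hence are nonnegative and in range for the k buckets.
def gwcStep (k r : Int) (st : List (List Int) × List (List Int) × List Int × List Int)
    (c : Int) : List (List Int) × List (List Int) × List Int × List Int :=
  let cell := r * k + c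
  match st with
  | (rows, cols, diag, anti) =>
    (rows.modify r.toNat (· ++ [cell]),
     cols.modify c.toNat (· ++ [cell]),
     if r = c then diag ++ [cell] else diag,
     if r + c = k - 1 then anti ++ [cell] else anti)

def generate_winning_combinations_alt (board_size : Int) : List (List Int) :=
  let k := board_size
  let rows : List (List Int) := (PySem.List.pyRange 0 k 1).map (fun _ => [])
  let cols : List (List Int) := (PySem.List.pyRange 0 k 1).map (fun _ => [])
  match (PySem.List.pyRange 0 k 1).foldl
      (fun st r => (PySem.List.pyRange 0 k 1).foldl (gwcStep k r) st)
      (rows, cols, [], []) with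
  | (rows, cols, diag, anti) => rows ++ cols ++ [diag, anti]

-- ===== PRECONDITION & SPEC =====
def Spec_generate_winning_combinations (board_size : Int) (out : List (List Int)) : Prop := out = generate_winning_combinations_alt board_size
instance (board_size : Int) (out : List (List Int)) : Decidable (Spec_generate_winning_combinations board_size out) := by unfold Spec_generate_winning_combinations; infer_instance

-- ===== CLAIM (what is proved, stated in full; the proofs are below) =====
def Claim_equal_generate_winning_combinations : Prop := ∀ (board_size : Int), Dom_generate_winning_combinations board_size → Spec_generate_winning_combinations board_size (generate_winning_combinations board_size)

-- ===== LEMMAS AND PROOFS =====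

-- the inner loop of B, characterised: each column bucket from c0 on gets one cell,
-- row bucket r gets the whole tail of its row, the diagonals get at most one cell each.
lemma pv_inner (k r : Int) (hr : 0 ≤ r) :
    ∀ (d : Nat) (c0 : Int), (k - c0).toNat = d → 0 ≤ c0 →
    ∀ (rows cols : List (List Int)) (diag anti : List Int), (cols.length : Int) = k →
    (PySem.List.pyRange c0 k 1).foldl (gwcStep k r) (rows, cols, diag, anti) =
      ( rows.modify r.toNat (· ++ (PySem.List.pyRange c0 k 1).map (fun c => r * k + c)),
        cols.mapIdx (fun j col => if c0 ≤ (j : Int) then col ++ [r * k + (j : Int)] else col),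
        diag ++ (if c0 ≤ r ∧ r < k then [r * k + r] else []),
        anti ++ (if c0 ≤ k - 1 - r ∧ 0 ≤ r then [r * k + (k - 1 - r)] else []) ) := by
  intro d
  induction d with
  | zero =>
    intro c0 hd hc0 rows cols diag anti hcl
    have hkc : k ≤ c0 := by omega
    rw [PySem.List.pyRange_one_eq_nil hkc]
    simp only [List.foldl_nil, List.map_nil, List.append_nil]
    simp only [Prod.mk.injEq]
    refine ⟨?_, ?_, ?_, ?_⟩
    · apply List.ext_getElem (by simp)
      intro j h1 h2
      rw [List.getElem_modify]
      split_ifs <;> rfl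
    · apply List.ext_getElem (by simp)
      intro j h1 h2
      have hjk : (j : Int) < k := by
        have : j < cols.length := by simpa using h2
        omega
      rw [List.getElem_mapIdx]
      have : ¬ c0 ≤ (j : Int) := by omega
      simp [this]
    · have : ¬ (c0 ≤ r ∧ r < k) := by omega
      simp [this]
    · have : ¬ (c0 ≤ k - 1 - r ∧ 0 ≤ r) := by omega
      simp [this]
  | succ d ih =>
    intro c0 hd hc0 rows cols diag anti hcl
    have hck : c0 < k := by omega
    rw [PySem.List.pyRange_one_cons hck]
    simp only [List.foldl_cons, List.map_cons]
    show (PySem.List.pyRange (c0+1) k 1).foldl (gwcStep k r) (gwcStep k r (rows, cols, diag, anti) c0) = _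
    simp only [gwcStep]
    rw [ih (c0+1) (by omega) (by omega) _ _ _ _ (by simpa using hcl)]
    simp only [Prod.mk.injEq]
    refine ⟨?_, ?_, ?_, ?_⟩
    · -- rows: two modifies at the same index compose
      apply List.ext_getElem (by simp)
      intro j h1 h2
      rw [List.getElem_modify, List.getElem_modify, List.getElem_modify]
      split_ifs with h
      · simp
      · rfl
    · -- cols
      apply List.ext_getElem (by simp)
      intro j h1 h2
      have h2' : j < cols.length := by simpa using h2
      rw [List.getElem_mapIdx, List.getElem_mapIdx]
      by_cases hj : j = c0.toNat
      · subst hj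
        have hji : ((c0.toNat : Nat) : Int) = c0 := by omega
        have hnot : ¬ c0 + 1 ≤ ((c0.toNat : Nat) : Int) := by omega
        rw [List.getElem_modify]
        simp [hji]
      · have hji : ((j : Nat) : Int) ≠ c0 := by omega
        have : (if c0 + 1 ≤ (j : Int) then True else False) = (if c0 ≤ (j : Int) then True else False) := by
          split_ifs with a b <;> try rfl
          · omega
          · omega
        rw [List.getElem_modify]
        have hne : ¬ c0.toNat = j := by omega
        simp only [hne, if_false]
        by_cases hle : c0 ≤ (j : Int)
        · have : c0 + 1 ≤ (j : Int) := by omega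
          simp [hle, this]
        · have : ¬ c0 + 1 ≤ (j : Int) := by omega
          simp [hle, this]
    · -- diag
      by_cases hrc : r = c0
      · subst hrc
        rw [if_pos rfl]
        have h1 : ¬ (r + 1 ≤ r ∧ r < k) := by omega
        have h2 : r ≤ r ∧ r < k := by omega
        rw [if_neg h1, if_pos h2]
        simp
      · rw [if_neg hrc]
        split_ifs with a b <;> first | rfl | omega
    · -- anti
      by_cases hrc : r + c0 = k - 1
      · have hc : k - 1 - r = c0 := by omega
        rw [if_pos hrc]
        have h1 : ¬ (c0 + 1 ≤ k - 1 - r ∧ 0 ≤ r) := by omega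
        have h2 : c0 ≤ k - 1 - r ∧ 0 ≤ r := by omega
        rw [if_neg h1, if_pos h2]
        simp [hc]
      · rw [if_neg hrc]
        split_ifs with a b <;> first | rfl | omega

-- the outer loop of B, characterised.
lemma pv_outer (k : Int) :
    ∀ (d : Nat) (r0 : Int), (k - r0).toNat = d → 0 ≤ r0 →
    ∀ (rows cols : List (List Int)) (diag anti : List Int),
    (rows.length : Int) = k → (cols.length : Int) = k →
    (PySem.List.pyRange r0 k 1).foldl
        (fun st r => (PySem.List.pyRange 0 k 1).foldl (gwcStep k r) st) (rows, cols, diag, anti) =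
      ( rows.mapIdx (fun j row => if r0 ≤ (j : Int) then row ++ (PySem.List.pyRange 0 k 1).map (fun c => (j : Int) * k + c) else row),
        cols.mapIdx (fun j col => col ++ (PySem.List.pyRange r0 k 1).map (fun r => r * k + (j : Int))),
        diag ++ (PySem.List.pyRange r0 k 1).map (fun i => i * k + i),
        anti ++ (PySem.List.pyRange r0 k 1).map (fun i => i * k + (k - 1 - i)) ) := by
  intro d
  induction d with
  | zero =>
    intro r0 hd hr0 rows cols diag anti hrl hcl
    have hkr : k ≤ r0 := by omega
    rw [PySem.List.pyRange_one_eq_nil hkr]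
    simp only [List.foldl_nil, List.map_nil, List.append_nil]
    simp only [Prod.mk.injEq]
    refine ⟨?_, ?_, trivial⟩
    · apply List.ext_getElem (by simp)
      intro j h1 h2
      rw [List.getElem_mapIdx]
      have : ¬ r0 ≤ (j : Int) := by
        have : j < rows.length := by simpa using h2
        omega
      simp [this]
    · apply List.ext_getElem (by simp)
      intro j h1 h2
      rw [List.getElem_mapIdx]
  | succ d ih =>
    intro r0 hd hr0 rows cols diag anti hrl hcl
    have hrk : r0 < k := by omega
    rw [PySem.List.pyRange_one_cons hrk]
    simp only [List.foldl_cons]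
    rw [pv_inner k r0 hr0 ((k : Int) - 0).toNat 0 rfl (by omega) rows cols diag anti hcl]
    rw [ih (r0+1) (by omega) (by omega) _ _ _ _ (by simpa using hrl) (by simpa using hcl)]
    simp only [Prod.mk.injEq]
    refine ⟨?_, ?_, ?_, ?_⟩
    · -- rows
      apply List.ext_getElem (by simp)
      intro j h1 h2
      have h2' : j < rows.length := by simpa using h2
      rw [List.getElem_mapIdx, List.getElem_mapIdx, List.getElem_modify]
      by_cases hj : j = r0.toNat
      · subst hj
        have hji : ((r0.toNat : Nat) : Int) = r0 := by omega
        have hnot : ¬ r0 + 1 ≤ ((r0.toNat : Nat) : Int) := by omega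
        simp [hji]
      · have hne : ¬ r0.toNat = j := by omega
        simp only [hne, if_false]
        by_cases hle : r0 ≤ (j : Int)
        · have hji : ((j : Nat) : Int) ≠ r0 := by omega
          have : r0 + 1 ≤ (j : Int) := by omega
          simp [hle, this]
        · have : ¬ r0 + 1 ≤ (j : Int) := by omega
          simp [hle, this]
    · -- cols
      apply List.ext_getElem (by simp)
      intro j h1 h2
      have h2' : j < cols.length := by simpa using h2
      rw [List.getElem_mapIdx, List.getElem_mapIdx, List.getElem_mapIdx]
      have hle : (0 : Int) ≤ (j : Int) := by omega
      simp [hle, List.append_assoc]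
    · -- diag
      have : (0 ≤ r0 ∧ r0 < k) := by omega
      simp [this, List.append_assoc]
    · -- anti
      have h : (0 ≤ k - 1 - r0 ∧ 0 ≤ r0) := by omega
      rw [if_pos h]
      simp [List.append_assoc]

theorem pv_main (k : Int) :
    generate_winning_combinations k = generate_winning_combinations_alt k := by
  by_cases hk : k ≤ 0
  · simp [generate_winning_combinations, generate_winning_combinations_alt,
      PySem.List.pyRange_one_eq_nil hk]
  · have hk' : 0 < k := by omega
    unfold generate_winning_combinations generate_winning_combinations_alt
    simp only [PySem.List.foldl_append_singleton_eq_map, List.nil_append]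
    have hlen : (((PySem.List.pyRange 0 k 1).map (fun _ => ([] : List Int))).length : Int) = k := by
      simp [PySem.List.length_pyRange_one]
      omega
    rw [pv_outer k (k - 0).toNat 0 rfl (by omega) _ _ _ _ hlen hlen]
    have hrows : ((PySem.List.pyRange 0 k 1).map (fun _ => ([] : List Int))).mapIdx
          (fun j row => if (0 : Int) ≤ (j : Int) then row ++ (PySem.List.pyRange 0 k 1).map (fun c => (j : Int) * k + c) else row)
        = (PySem.List.pyRange 0 k 1).map (fun row => (PySem.List.pyRange 0 k 1).map (fun col => row * k + col)) := by
      apply List.ext_getElem (by simp)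
      intro j h1 h2
      have h0 : (0 : Int) ≤ (j : Int) := by omega
      have hj : j < (PySem.List.pyRange 0 k 1).length := by simpa using h2
      rw [List.getElem_mapIdx, List.getElem_map, List.getElem_map, PySem.List.getElem_pyRange_one]
      simp [h0]
    have hcols : ((PySem.List.pyRange 0 k 1).map (fun _ => ([] : List Int))).mapIdx
          (fun j col => col ++ (PySem.List.pyRange 0 k 1).map (fun r => r * k + (j : Int)))
        = (PySem.List.pyRange 0 k 1).map (fun col => (PySem.List.pyRange 0 k 1).map (fun row => row * k + col)) := by
      apply List.ext_getElem (by simp)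
      intro j h1 h2
      have hj : j < (PySem.List.pyRange 0 k 1).length := by simpa using h2
      rw [List.getElem_mapIdx, List.getElem_map, List.getElem_map, PySem.List.getElem_pyRange_one]
      simp
    rw [hrows, hcols]
    simp [List.append_assoc]

-- ===== VERDICT (by name: the statement is the Claim_ definition above) =====
theorem generate_winning_combinations_spec : Claim_equal_generate_winning_combinations := by
  intro k _
  exact pv_main k
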